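-- pv_equiv track=rewrite | github.com/bijalm/codesignal-arcade | intro /matrixElementsSum.py | solution
-- ===== SOURCE A (Python) =====
-- def solution(matrix):
--     cost = 0
--     for i in range(len(matrix)):
--         for j in range(len(matrix[i])):
--             if i == 0:
--                 if matrix[i][j] != 0:
--                     cost += matrix[i][j]
--             else:
--                 haunted = False
--                 for x in range(0, i):
--                     if matrix[x][j] == 0:
--                         haunted = True
--
--                 if not haunted and matrix[i][j] != 0:
--                     cost += matrix[i][j]
--
--     return cost
-- ===== SOURCE B (Python) =====
-- def solution(matrix):
--     blocked = set()
--     cost = 0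
--     for row in matrix:
--         for j in range(len(row)):
--             if j in blocked:
--                 continue
--             if row[j] == 0:
--                 blocked.add(j)
--             else:
--                 cost += row[j]
--     return cost
-- ===== Notes on version B (the rewrite author's own statement) =====
-- stated objective: faster
-- what changed: Replaced A's per-cell upward rescan of the whole column (an inner loop over all earlier rows for every cell) with a single top-to-bottom pass that maintains a set of already-blocked (zero-seen) column indices.
import Mathlib
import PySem

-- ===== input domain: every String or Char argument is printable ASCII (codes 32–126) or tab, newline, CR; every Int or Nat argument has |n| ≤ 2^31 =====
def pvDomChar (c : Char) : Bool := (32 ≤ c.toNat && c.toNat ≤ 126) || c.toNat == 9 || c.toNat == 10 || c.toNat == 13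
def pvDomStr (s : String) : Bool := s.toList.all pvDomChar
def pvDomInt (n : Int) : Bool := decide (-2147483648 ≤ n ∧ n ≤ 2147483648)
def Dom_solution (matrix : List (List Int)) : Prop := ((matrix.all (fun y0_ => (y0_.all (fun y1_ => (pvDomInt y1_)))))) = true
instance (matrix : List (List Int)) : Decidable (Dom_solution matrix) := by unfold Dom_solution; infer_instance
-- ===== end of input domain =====

-- B replaces A's per-cell upward rescan of the column with one forward pass that maintains a set of
-- already-blocked (zero-seen) columns: simpler and asymptotically faster on tall matrices.

-- ===== PORT A =====
-- List accesses matrix[i], matrix[i][j] are always in range by the loop bounds; matrix[x][j] in the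
-- haunted loop raises IndexError in Python when row x is shorter than row i — those inputs are
-- excluded by Pre_solution, and the default 1 below is only reached outside Pre_solution.
def solution (matrix : List (List Int)) : Int :=
  (List.range matrix.length).foldl (fun cost i =>
    let row := matrix.getD i []
    (List.range row.length).foldl (fun cost j =>
      if i = 0 then
        if row.getD j 0 ≠ 0 then cost + row.getD j 0 else cost
      else
        let haunted := (List.range i).foldl (fun h x =>
          if (matrix.getD x []).getD j 1 = 0 then true else h) false
        if haunted = false ∧ row.getD j 0 ≠ 0 then cost + row.getD j 0 else cost) cost) 0

-- ===== PORT B =====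
def solution_alt (matrix : List (List Int)) : Int :=
  (matrix.foldl (fun (st : PySem.Set Nat × Int) row =>
    (List.range row.length).foldl (fun st j =>
      if PySem.Set.contains st.1 j then st
      else if row.getD j 0 = 0 then (PySem.Set.add st.1 j, st.2)
      else (st.1, st.2 + row.getD j 0)) st)
    (PySem.Set.empty, 0)).2

-- ===== PRECONDITION & SPEC =====
-- Pre_solution excludes exactly the ragged matrices on which Python A raises IndexError
-- (a row longer than some earlier row makes the haunted loop index past that earlier row).
def Pre_solution (matrix : List (List Int)) : Prop :=
  matrix.Pairwise (fun r s => s.length ≤ r.length)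
instance (matrix : List (List Int)) : Decidable (Pre_solution matrix) := by
  unfold Pre_solution; infer_instance
def pvWitness_solution : List (List Int) := [[1, 2], [0, 3]]

def Spec_solution (matrix : List (List Int)) (out : Int) : Prop := out = solution_alt matrix
instance (matrix : List (List Int)) (out : Int) : Decidable (Spec_solution matrix out) := by unfold Spec_solution; infer_instance

-- ===== CLAIM (what is proved, stated in full; the proofs are below) =====
def Claim_equal_solution : Prop := ∀ (matrix : List (List Int)), Dom_solution matrix → Pre_solution matrix → Spec_solution matrix (solution matrix)

-- ===== LEMMAS AND PROOFS =====

-- blocked-column predicate after processing one more row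
def blkUpd (blk : Nat → Bool) (row : List Int) : Nat → Bool :=
  fun j => blk j || decide (row.getD j 1 = 0)

-- contribution of one row given the blocked columns
def rowSum (row : List Int) (blk : Nat → Bool) : Int :=
  (List.range row.length).foldl
    (fun c j => if blk j = false ∧ row.getD j 0 ≠ 0 then c + row.getD j 0 else c) 0

-- reference cost: front-to-back recursion over the rows
def cost : List (List Int) → (Nat → Bool) → Int
  | [], _ => 0
  | r :: rs, blk => rowSum r blk + cost rs (blkUpd blk r)

lemma foldl_if_shift (l : List Nat) (p : Nat → Prop) [DecidablePred p] (v : Nat → Int) (c : Int) :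
    l.foldl (fun c j => if p j then c + v j else c) c
      = c + l.foldl (fun c j => if p j then c + v j else c) 0 := by
  induction l generalizing c with
  | nil => simp
  | cons a l ih =>
    simp only [List.foldl_cons]
    by_cases h : p a
    · rw [if_pos h, if_pos h, ih (c + v a), ih (0 + v a)]; ring
    · rw [if_neg h, if_neg h, ih c]

lemma cost_append (rs : List (List Int)) (r : List Int) (blk : Nat → Bool) :
    cost (rs ++ [r]) blk = cost rs blk + rowSum r (rs.foldl blkUpd blk) := by
  induction rs generalizing blk with
  | nil => simp [cost]
  | cons s rs ih => simp [cost, ih, add_assoc]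

lemma blk_take (matrix : List (List Int)) (i : Nat) (hi : i ≤ matrix.length) (j : Nat) :
    (List.range i).foldl (fun h x => if (matrix.getD x []).getD j 1 = 0 then true else h) false
      = (matrix.take i).foldl blkUpd (fun _ => false) j := by
  induction i with
  | zero => simp
  | succ i ih =>
    have hlt : i < matrix.length := hi
    rw [List.range_succ, List.foldl_append, List.take_succ, List.foldl_append]
    have : matrix[i]? = some (matrix.getD i []) := by
      rw [List.getD_eq_getElem?_getD, List.getElem?_eq_getElem hlt]; rfl
    rw [this]
    simp only [Option.toList_some, List.foldl_cons, List.foldl_nil, blkUpd,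
      ih (Nat.le_of_lt hlt)]
    rw [Bool.or_comm]
    by_cases h : (matrix.getD i []).getD j 1 = 0 <;> simp [h]

lemma rowSum_bot (r : List Int) :
    rowSum r (fun _ => false)
      = (List.range r.length).foldl
          (fun c j => if r.getD j 0 ≠ 0 then c + r.getD j 0 else c) 0 := by
  unfold rowSum
  congr 1
  funext c j
  simp

lemma solution_eq_cost (matrix : List (List Int)) :
    solution matrix = cost matrix (fun _ => false) := by
  suffices h : ∀ k, k ≤ matrix.length →
      (List.range k).foldl (fun cost i =>
        let row := matrix.getD i []
        (List.range row.length).foldl (fun cost j =>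
          if i = 0 then
            if row.getD j 0 ≠ 0 then cost + row.getD j 0 else cost
          else
            let haunted := (List.range i).foldl (fun h x =>
              if (matrix.getD x []).getD j 1 = 0 then true else h) false
            if haunted = false ∧ row.getD j 0 ≠ 0 then cost + row.getD j 0 else cost) cost) 0
        = cost (matrix.take k) (fun _ => false) by
    have := h matrix.length (le_refl _)
    simpa [solution] using this
  intro k hk
  induction k with
  | zero => simp [cost]
  | succ k ih =>
    have hlt : k < matrix.length := hk
    rw [List.range_succ, List.foldl_append, List.foldl_cons, List.foldl_nil,
      ih (Nat.le_of_lt hlt)]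
    have htake : matrix.take (k + 1) = matrix.take k ++ [matrix.getD k []] := by
      rw [List.take_succ, List.getD_eq_getElem?_getD, List.getElem?_eq_getElem hlt]; rfl
    rw [htake, cost_append]
    by_cases hk0 : k = 0
    · subst hk0
      simp only [List.take_zero, List.foldl_nil, cost]
      rw [rowSum_bot, foldl_if_shift]
      simp
    · simp only [if_neg hk0]
      have hblk' : ∀ j : Nat, (List.range k).foldl
            (fun h x => if (matrix.getD x []).getD j 1 = 0 then true else h) false
          = (matrix.take k).foldl blkUpd (fun _ => false) j :=
        fun j => blk_take matrix k (Nat.le_of_lt hlt) j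
      simp only [hblk']
      rw [foldl_if_shift (p := fun j => ((matrix.take k).foldl blkUpd (fun _ => false)) j = false
            ∧ (matrix.getD k []).getD j 0 ≠ 0) (v := fun j => (matrix.getD k []).getD j 0)]
      rfl

-- membership in a PySem.Set as a Bool test
lemma contains_eq_mem {j : Nat} (s : PySem.Set Nat) :
    PySem.Set.contains s j = decide (j ∈ s) := by
  simp [PySem.Set.contains]

-- named copies of B's loop bodies (definitionally equal to the lambdas in solution_alt)
def stepB (row : List Int) (st : PySem.Set Nat × Int) (j : Nat) : PySem.Set Nat × Int :=
  if PySem.Set.contains st.1 j then st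
  else if row.getD j 0 = 0 then (PySem.Set.add st.1 j, st.2)
  else (st.1, st.2 + row.getD j 0)

def rowB (st : PySem.Set Nat × Int) (row : List Int) : PySem.Set Nat × Int :=
  (List.range row.length).foldl (stepB row) st

-- characterisation of B's inner loop over one row
lemma innerB (row : List Int) (st : PySem.Set Nat × Int) : ∀ n : Nat,
    ((List.range n).foldl (stepB row) st).2
      = st.2 + (List.range n).foldl
          (fun c j => if j ∉ st.1 ∧ row.getD j 0 ≠ 0 then c + row.getD j 0 else c) 0
    ∧ ∀ j : Nat, (j ∈ ((List.range n).foldl (stepB row) st).1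
      ↔ j ∈ st.1 ∨ (j < n ∧ row.getD j 0 = 0)) := by
  intro n
  induction n with
  | zero => simp
  | succ n ih =>
    obtain ⟨ih2, ih1⟩ := ih
    rw [List.range_succ, List.foldl_append, List.foldl_cons, List.foldl_nil]
    by_cases hin : n ∈ ((List.range n).foldl (stepB row) st).1
    · have hc : PySem.Set.contains ((List.range n).foldl (stepB row) st).1 n = true := by
        rw [contains_eq_mem]; exact decide_eq_true hin
      have hst : n ∈ st.1 := by
        rcases (ih1 n).mp hin with h | ⟨h, _⟩
        · exact h
        · exact absurd h (lt_irrefl n)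
      constructor
      · rw [stepB, if_pos hc, ih2]
        congr 1
        rw [List.foldl_append, List.foldl_cons, List.foldl_nil,
          if_neg (by exact fun h => h.1 hst)]
      · intro j
        rw [stepB, if_pos hc, ih1 j]
        constructor
        · rintro (h | ⟨h, h0⟩)
          · exact Or.inl h
          · exact Or.inr ⟨Nat.lt_succ_of_lt h, h0⟩
        · rintro (h | ⟨h, h0⟩)
          · exact Or.inl h
          · rcases Nat.lt_succ_iff_lt_or_eq.mp h with h' | h'
            · exact Or.inr ⟨h', h0⟩
            · subst h'; exact Or.inl hst
    · have hc : PySem.Set.contains ((List.range n).foldl (stepB row) st).1 n = false := by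
        rw [contains_eq_mem]; exact decide_eq_false hin
      have hst : n ∉ st.1 := fun h => hin ((ih1 n).mpr (Or.inl h))
      by_cases h0 : row.getD n 0 = 0
      · constructor
        · rw [stepB, if_neg (by simp [contains_eq_mem, hin]), if_pos h0]
          rw [List.foldl_append, List.foldl_cons, List.foldl_nil,
            if_neg (by exact fun h => h.2 h0)]
          exact ih2
        · intro j
          rw [stepB, if_neg (by simp [contains_eq_mem, hin]), if_pos h0]
          simp only [PySem.Set.mem_add, ih1 j]
          constructor
          · rintro ((h | ⟨h, hz⟩) | h)
            · exact Or.inl h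
            · exact Or.inr ⟨Nat.lt_succ_of_lt h, hz⟩
            · subst h; exact Or.inr ⟨Nat.lt_succ_self _, h0⟩
          · rintro (h | ⟨h, hz⟩)
            · exact Or.inl (Or.inl h)
            · rcases Nat.lt_succ_iff_lt_or_eq.mp h with h' | h'
              · exact Or.inl (Or.inr ⟨h', hz⟩)
              · exact Or.inr h'
      · constructor
        · rw [stepB, if_neg (by simp [contains_eq_mem, hin]), if_neg h0]
          rw [List.foldl_append, List.foldl_cons, List.foldl_nil,
            if_pos ⟨hst, h0⟩]
          rw [ih2]; ring
        · intro j
          rw [stepB, if_neg (by simp [contains_eq_mem, hin]), if_neg h0]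
          simp only [ih1 j]
          constructor
          · rintro (h | ⟨h, hz⟩)
            · exact Or.inl h
            · exact Or.inr ⟨Nat.lt_succ_of_lt h, hz⟩
          · rintro (h | ⟨h, hz⟩)
            · exact Or.inl h
            · rcases Nat.lt_succ_iff_lt_or_eq.mp h with h' | h'
              · exact Or.inr ⟨h', hz⟩
              · subst h'; exact absurd hz h0

-- blkUpd matches B's membership update
lemma blkUpd_char (blk : Nat → Bool) (r : List Int) (j : Nat) :
    blkUpd blk r j = (blk j || (decide (j < r.length) && decide (r.getD j 0 = 0))) := by
  unfold blkUpd
  by_cases h : j < r.length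
  · have heq : r.getD j 1 = r.getD j 0 := by
      simp [List.getD_eq_getElem?_getD, List.getElem?_eq_getElem h]
    rw [heq]
    by_cases hz : r.getD j 0 = 0 <;> simp [h, hz]
  · have h1 : r.getD j 1 = 1 := by
      rw [List.getD_eq_getElem?_getD, List.getElem?_eq_none (by omega)]; rfl
    rw [h1]; simp [h]

lemma outerB (ms : List (List Int)) : ∀ st : PySem.Set Nat × Int,
    (ms.foldl rowB st).2 = st.2 + cost ms (fun j => decide (j ∈ st.1)) := by
  induction ms with
  | nil => simp [cost]
  | cons r rs ih =>
    intro st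
    rw [List.foldl_cons, ih]
    obtain ⟨h2, h1⟩ := innerB r st r.length
    rw [show rowB st r = (List.range r.length).foldl (stepB r) st from rfl, h2, cost]
    have hrow : (List.range r.length).foldl
        (fun c j => if j ∉ st.1 ∧ r.getD j 0 ≠ 0 then c + r.getD j 0 else c) 0
        = rowSum r (fun j => decide (j ∈ st.1)) := by
      unfold rowSum
      congr 1
      funext c j
      by_cases h : j ∈ st.1 <;> simp [h]
    have hblk : (fun j => decide (j ∈ ((List.range r.length).foldl (stepB r) st).1))
        = blkUpd (fun j => decide (j ∈ st.1)) r := by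
      funext j
      rw [blkUpd_char]
      by_cases h : j ∈ ((List.range r.length).foldl (stepB r) st).1
      · rw [decide_eq_true h]
        rw [h1 j] at h
        rcases h with h | ⟨hl, hz⟩
        · simp [h]
        · have hz' : r[j] = 0 := by
            simpa [List.getD_eq_getElem?_getD, List.getElem?_eq_getElem hl] using hz
          simp [hl, hz']
      · rw [decide_eq_false h]
        rw [h1 j] at h
        push_neg at h
        obtain ⟨hm, himp⟩ := h
        by_cases hl : j < r.length
        · have hz' : ¬ r[j] = 0 := by
            simpa [List.getD_eq_getElem?_getD, List.getElem?_eq_getElem hl] using himp hl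
          simp [hm, hz', List.getElem?_eq_getElem hl]
        · simp [hm, hl]
    rw [hrow, hblk]
    ring

lemma solution_alt_eq_cost (matrix : List (List Int)) :
    solution_alt matrix = cost matrix (fun _ => false) := by
  have hport : solution_alt matrix = (matrix.foldl rowB (PySem.Set.empty, 0)).2 := rfl
  rw [hport, outerB]
  have : (fun j : Nat => decide (j ∈ (PySem.Set.empty : PySem.Set Nat))) = fun _ => false := by
    funext j; simp [PySem.Set.empty]
  rw [this]
  simp

-- ===== VERDICT (by name: the statement is the Claim_ definition above) =====
theorem solution_spec : Claim_equal_solution := by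
  intro matrix _ _
  unfold Spec_solution
  rw [solution_eq_cost, solution_alt_eq_cost]
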